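-- pv_equiv track=rewrite | github.com/Gracellcc/sphere | skill_sphere/agent/alfworld_agent.py | match_to_admissible
-- ===== SOURCE A (Python) =====
-- def match_to_admissible(action: str, admissible: list[str]) -> str:
--     """Match a parsed action to the closest admissible action."""
--     if not admissible:
--         return action
--
--     action_lower = action.lower().strip()
--     for a in admissible:
--         if a.lower().strip() == action_lower:
--             return a
--
--     for a in admissible:
--         if action_lower in a.lower() or a.lower() in action_lower:
--             return a
--
--     action_words = set(action_lower.split())
--     best_score = -1
--     best_action = admissible[0]
--     for a in admissible:
--         a_words = set(a.lower().split())
--         score = len(action_words & a_words)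
--         if score > best_score:
--             best_score = score
--             best_action = a
--     return best_action
-- ===== SOURCE B (Python) =====
-- def match_to_admissible(action: str, admissible: list[str]) -> str:
--     """Match a parsed action to the closest admissible action (single pass with a priority key)."""
--     if not admissible:
--         return action
--     action_lower = action.lower().strip()
--     action_words = set(action_lower.split())
--     best_key = (-1, -1)
--     best_action = admissible[0]
--     for a in admissible:
--         a_lower = a.lower()
--         if a_lower.strip() == action_lower:
--             key = (2, 0)
--         elif action_lower in a_lower or a_lower in action_lower:
--             key = (1, 0)
--         else:
--             key = (0, len(action_words & set(a_lower.split())))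
--         if key > best_key:
--             best_key = key
--             best_action = a
--     return best_action
-- ===== Notes on version B (the rewrite author's own statement) =====
-- stated objective: alternative
-- what changed: Replaced A's three sequential scans (exact match, then substring match, then argmax word-overlap) by a single pass that assigns each candidate a lexicographic priority key (tier, overlap) and keeps a running best updated only on a strictly greater key, so the first exact / first substring / first-argmax tie-breaking is preserved.
import Mathlib
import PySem

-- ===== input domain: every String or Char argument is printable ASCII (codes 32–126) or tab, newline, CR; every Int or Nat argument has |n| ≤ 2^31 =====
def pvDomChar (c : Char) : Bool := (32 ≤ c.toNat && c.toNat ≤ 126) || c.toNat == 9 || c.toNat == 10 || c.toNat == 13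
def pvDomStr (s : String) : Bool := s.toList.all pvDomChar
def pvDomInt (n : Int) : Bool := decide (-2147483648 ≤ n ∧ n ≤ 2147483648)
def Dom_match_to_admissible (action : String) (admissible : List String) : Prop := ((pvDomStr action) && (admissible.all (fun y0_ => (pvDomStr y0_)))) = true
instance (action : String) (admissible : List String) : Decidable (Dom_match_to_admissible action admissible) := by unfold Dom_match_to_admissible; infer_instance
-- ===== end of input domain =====

-- B replaces A's three sequential scans by one pass keeping a running best (priority key, action); same result, different decomposition (objective: alternative).

-- shared elementary tests (named once, used by both ports):
-- a.lower().strip() == action_lower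
def pvExact (al a : String) : Bool := PySem.Str.strip (PySem.Str.lower a) == al
-- action_lower in a.lower() or a.lower() in action_lower
def pvSub (al a : String) : Bool := PySem.Str.isIn al (PySem.Str.lower a) || PySem.Str.isIn (PySem.Str.lower a) al
-- len(action_words & set(a.lower().split()))
def pvScore (aw : PySem.Set String) (a : String) : Int :=
  ((PySem.Set.inter aw (PySem.Set.ofList (PySem.Str.split₀ (PySem.Str.lower a)))).length : Int)

-- ===== PORT A =====
-- A's third loop body: keep (best_score, best_action), update on strictly greater score
def pvStepA (aw : PySem.Set String) (st : Int × String) (a : String) : Int × String :=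
  if pvScore aw a > st.1 then (pvScore aw a, a) else st

def match_to_admissible (action : String) (admissible : List String) : String :=
  match admissible with
  | [] => action
  | a0 :: _ =>
    let al := PySem.Str.strip (PySem.Str.lower action)
    match admissible.find? (fun a => pvExact al a) with
    | some a => a
    | none =>
      match admissible.find? (fun a => pvSub al a) with
      | some a => a
      | none =>
        let aw := PySem.Set.ofList (PySem.Str.split₀ al)
        (admissible.foldl (pvStepA aw) (-1, a0)).2

-- ===== PORT B =====
-- priority key per candidate: exact > substring > word-overlap
def pvKey (al : String) (aw : PySem.Set String) (a : String) : Int × Int :=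
  if pvExact al a then (2, 0)
  else if pvSub al a then (1, 0)
  else (0, pvScore aw a)

-- Python tuple comparison k > b on pairs
def pvKeyGt (k b : Int × Int) : Bool := k.1 > b.1 || (k.1 == b.1 && k.2 > b.2)

-- B's single-pass loop body
def pvStep (al : String) (aw : PySem.Set String) (st : (Int × Int) × String) (a : String) : (Int × Int) × String :=
  if pvKeyGt (pvKey al aw a) st.1 then (pvKey al aw a, a) else st

def match_to_admissible_alt (action : String) (admissible : List String) : String :=
  match admissible with
  | [] => action
  | a0 :: _ =>
    let al := PySem.Str.strip (PySem.Str.lower action)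
    let aw := PySem.Set.ofList (PySem.Str.split₀ al)
    (admissible.foldl (pvStep al aw) ((-1, -1), a0)).2

-- ===== PRECONDITION & SPEC =====
def Spec_match_to_admissible (action : String) (admissible : List String) (out : String) : Prop := out = match_to_admissible_alt action admissible
instance (action : String) (admissible : List String) (out : String) : Decidable (Spec_match_to_admissible action admissible out) := by unfold Spec_match_to_admissible; infer_instance

-- ===== CLAIM (what is proved, stated in full; the proofs are below) =====
def Claim_equal_match_to_admissible : Prop := ∀ (action : String) (admissible : List String), Dom_match_to_admissible action admissible → Spec_match_to_admissible action admissible (match_to_admissible action admissible)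

-- ===== LEMMAS AND PROOFS =====

lemma pvScore_nonneg (aw : PySem.Set String) (a : String) : 0 ≤ pvScore aw a := by
  simp [pvScore]

-- nothing beats key (2,0)
lemma pvKeyGt_top (al : String) (aw : PySem.Set String) (a : String) :
    pvKeyGt (pvKey al aw a) (2, 0) = false := by
  unfold pvKey pvKeyGt
  split_ifs <;> simp

-- a non-exact candidate does not beat key (1,0)
lemma pvKeyGt_mid (al : String) (aw : PySem.Set String) (a : String)
    (h : pvExact al a = false) :
    pvKeyGt (pvKey al aw a) (1, 0) = false := by
  unfold pvKey pvKeyGt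
  rw [h]
  split_ifs <;> simp_all

-- state with key (2,0) is final
lemma fold_top (al : String) (aw : PySem.Set String) (l : List String) (s : String) :
    l.foldl (pvStep al aw) ((2, 0), s) = ((2, 0), s) := by
  induction l with
  | nil => rfl
  | cons a t ih =>
      simp only [List.foldl_cons, pvStep, pvKeyGt_top, Bool.false_eq_true, if_false]
      exact ih

-- with no exact match in l, a state with key (1,0) is final
lemma fold_mid (al : String) (aw : PySem.Set String) (l : List String) (s : String)
    (h : ∀ a ∈ l, pvExact al a = false) :
    l.foldl (pvStep al aw) ((1, 0), s) = ((1, 0), s) := by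
  induction l with
  | nil => rfl
  | cons a t ih =>
      simp only [List.foldl_cons, pvStep, pvKeyGt_mid al aw a (h a (by simp)),
        Bool.false_eq_true, if_false]
      exact ih fun x hx => h x (by simp [hx])

-- case 1: some exact match exists; B's fold lands on the first one
lemma fold_case1 (al : String) (aw : PySem.Set String) (l : List String) (a' : String)
    (hfind : l.find? (fun a => pvExact al a) = some a') :
    ∀ st : (Int × Int) × String, st.1.1 ≤ 1 →
      (l.foldl (pvStep al aw) st).2 = a' := by
  induction l with
  | nil => simp at hfind
  | cons a t ih =>
      intro st hst
      by_cases hx : pvExact al a = true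
      · rw [List.find?_cons_of_pos hx] at hfind
        obtain rfl : a = a' := by injection hfind
        simp only [List.foldl_cons]
        have h2 : pvKeyGt (2, 0) st.1 = true := by
          simp [pvKeyGt]; omega
        have hstep : pvStep al aw st a = ((2, 0), a) := by
          simp [pvStep, pvKey, hx, h2]
        rw [hstep, fold_top]
      · rw [List.find?_cons_of_neg (by simp [hx])] at hfind
        simp only [List.foldl_cons]
        apply ih hfind
        have hxf : pvExact al a = false := by simpa using hx
        unfold pvStep pvKey
        rw [hxf]
        split_ifs <;> simp_all

-- case 2: no exact match, some substring match; B's fold lands on the first substring match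
lemma fold_case2 (al : String) (aw : PySem.Set String) (l : List String) (a' : String)
    (hne : ∀ a ∈ l, pvExact al a = false)
    (hfind : l.find? (fun a => pvSub al a) = some a') :
    ∀ st : (Int × Int) × String, st.1.1 ≤ 0 →
      (l.foldl (pvStep al aw) st).2 = a' := by
  induction l with
  | nil => simp at hfind
  | cons a t ih =>
      intro st hst
      have hxa : pvExact al a = false := hne a (by simp)
      by_cases hs : pvSub al a = true
      · rw [List.find?_cons_of_pos hs] at hfind
        obtain rfl : a = a' := by injection hfind
        simp only [List.foldl_cons]
        have h2 : pvKeyGt (1, 0) st.1 = true := by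
          simp [pvKeyGt]; omega
        have hstep : pvStep al aw st a = ((1, 0), a) := by
          simp [pvStep, pvKey, hxa, hs, h2]
        rw [hstep, fold_mid al aw t a fun x hx => hne x (by simp [hx])]
      · rw [List.find?_cons_of_neg (by simp [hs])] at hfind
        simp only [List.foldl_cons]
        apply ih (fun x hx => hne x (by simp [hx])) hfind
        have hsf : pvSub al a = false := by simpa using hs
        unfold pvStep pvKey
        rw [hxa, hsf]
        split_ifs <;> simp_all

-- case 3: neither exact nor substring anywhere; B's fold simulates A's third loop
lemma fold_case3 (al : String) (aw : PySem.Set String) (l : List String)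
    (hne : ∀ a ∈ l, pvExact al a = false)
    (hns : ∀ a ∈ l, pvSub al a = false) :
    ∀ (stA : Int × String) (stB : (Int × Int) × String),
      stB.2 = stA.2 → (stB.1 = (0, stA.1) ∨ (stA.1 = -1 ∧ stB.1 = (-1, -1))) →
      (l.foldl (pvStep al aw) stB).2 = (l.foldl (pvStepA aw) stA).2 := by
  induction l with
  | nil => intro stA stB h1 _; simpa using h1
  | cons a t ih =>
      intro stA stB h1 h2
      have hk : pvKey al aw a = (0, pvScore aw a) := by
        unfold pvKey
        rw [hne a (by simp), hns a (by simp)]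
        simp
      simp only [List.foldl_cons, pvStep, pvStepA, pvKeyGt, hk]
      rcases h2 with h2 | ⟨h2a, h2b⟩
      · rw [h2]
        by_cases hgt : pvScore aw a > stA.1
        · have hb : (((0 : Int), pvScore aw a).1 > ((0 : Int), stA.1).1 ||
              (((0 : Int), pvScore aw a).1 == ((0 : Int), stA.1).1 &&
               ((0 : Int), pvScore aw a).2 > ((0 : Int), stA.1).2)) = true := by
            simp; omega
          rw [if_pos (by simp at hb ⊢; exact hb), if_pos (by simpa using hgt)]
          exact ih (fun x hx => hne x (by simp [hx])) (fun x hx => hns x (by simp [hx]))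
            _ _ rfl (Or.inl rfl)
        · have hb : (((0 : Int), pvScore aw a).1 > ((0 : Int), stA.1).1 ||
              (((0 : Int), pvScore aw a).1 == ((0 : Int), stA.1).1 &&
               ((0 : Int), pvScore aw a).2 > ((0 : Int), stA.1).2)) = false := by
            simp; omega
          rw [if_neg (by simp at hb ⊢; omega), if_neg (by simpa using hgt)]
          exact ih (fun x hx => hne x (by simp [hx])) (fun x hx => hns x (by simp [hx]))
            _ _ h1 (Or.inl h2)
      · rw [h2a, h2b]
        have hgt : pvScore aw a > (-1 : Int) := by
          have := pvScore_nonneg aw a; omega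
        rw [if_pos (by simp), if_pos (by simpa using hgt)]
        exact ih (fun x hx => hne x (by simp [hx])) (fun x hx => hns x (by simp [hx]))
          _ _ rfl (Or.inl rfl)

-- ===== VERDICT (by name: the statement is the Claim_ definition above) =====
theorem match_to_admissible_spec : Claim_equal_match_to_admissible := by
  intro action admissible _
  unfold Spec_match_to_admissible match_to_admissible match_to_admissible_alt
  cases admissible with
  | nil => rfl
  | cons a0 rest =>
      simp only []
      set al := PySem.Str.strip (PySem.Str.lower action) with hal
      set aw := PySem.Set.ofList (PySem.Str.split₀ al) with haw
      set L := a0 :: rest with hL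
      rcases hfe : L.find? (fun a => pvExact al a) with _ | a1
      · rcases hfs : L.find? (fun a => pvSub al a) with _ | a2
        · have hne : ∀ a ∈ L, pvExact al a = false := by
            intro a ha
            simpa using List.find?_eq_none.mp hfe a ha
          have hns : ∀ a ∈ L, pvSub al a = false := by
            intro a ha
            simpa using List.find?_eq_none.mp hfs a ha
          exact (fold_case3 al aw L hne hns (-1, a0) ((-1, -1), a0) rfl (Or.inr ⟨rfl, rfl⟩)).symm
        · have hne : ∀ a ∈ L, pvExact al a = false := by
            intro a ha
            simpa using List.find?_eq_none.mp hfe a ha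
          exact (fold_case2 al aw L a2 hne hfs ((-1, -1), a0) (by norm_num)).symm
      · exact (fold_case1 al aw L a1 hfe ((-1, -1), a0) (by norm_num)).symm
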